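-- pv_equiv track=rewrite | github.com/JamieJQuinn/IR-GTS | src/pokemon.py | determine_shuffle_block_order
-- ===== SOURCE A (Python) =====
-- def determine_shuffle_block_order(pid):
--     block_positions = {
--         'a' : [ 0,0,0,0,0,0,  1,1,1,1,1,1,  2,2,2,2,2,2, 3,3,2,3,3,3 ],
--         'b' : [ 1,1,2,2,3,3,  0,0,2,2,3,3,  0,0,1,1,3,3, 0,0,1,1,2,2 ],
--         'c' : [ 2,3,1,3,1,2,  2,3,0,3,0,2,  1,3,0,3,0,1, 1,2,0,2,0,1 ],
--         'd' : [ 3,2,3,1,2,1,  3,2,3,0,2,0,  3,1,3,0,1,0, 2,1,2,0,1,0 ],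
--     }
--     order = ((pid & 0x3E000) >> 13) % 24
--     return [block[order] for block in block_positions.values()]
-- ===== SOURCE B (Python) =====
-- def determine_shuffle_block_order(pid):
--     # Lehmer (factorial number system) decode of the order-th lexicographic
--     # permutation of [0,1,2,3], instead of four hard-coded lookup tables.
--     order = ((pid & 0x3E000) >> 13) % 24
--     digits = [0, 1, 2, 3]
--     result = []
--     for f in (6, 2, 1, 1):  # 3!, 2!, 1!, 0!
--         i = order // f
--         order = order % f
--         result.append(digits.pop(i))
--     return result
-- ===== Notes on version B (the rewrite author's own statement) =====
-- stated objective: alternative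
-- what changed: B computes the permutation arithmetically by Lehmer-decoding the order index in the factorial number system instead of indexing four hard-coded 24-entry tables.
-- intended difference: On pids whose bits 13-17 equal 20 (pid & 0x3E000 == 0x28000), A returns [2,1,0,2] -- not a permutation, a typo in its 'a' table -- while B returns the intended 20th lexicographic permutation [3,1,0,2]. — e.g. on determine_shuffle_block_order(163840): A returns [2, 1, 0, 2], B returns [3, 1, 0, 2]
import Mathlib
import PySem

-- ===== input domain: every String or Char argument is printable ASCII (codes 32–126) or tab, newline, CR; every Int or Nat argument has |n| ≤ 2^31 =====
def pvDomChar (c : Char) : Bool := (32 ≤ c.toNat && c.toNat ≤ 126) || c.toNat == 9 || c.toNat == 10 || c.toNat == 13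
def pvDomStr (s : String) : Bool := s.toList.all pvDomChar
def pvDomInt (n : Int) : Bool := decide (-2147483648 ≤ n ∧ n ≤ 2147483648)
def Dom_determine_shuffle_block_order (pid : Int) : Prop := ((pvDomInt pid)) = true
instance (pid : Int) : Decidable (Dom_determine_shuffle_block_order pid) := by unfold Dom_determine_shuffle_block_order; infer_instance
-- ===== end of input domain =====

-- B derives the shuffle permutation by Lehmer-decoding the order index instead of
-- reading four hard-coded tables; A's 'a' table has a typo at order 20 (stated in D_ below).

-- ===== PORT A =====
-- literal transliteration: dict of four fixed rows, each indexed at `order` (always in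
-- [0,24), so the Python indexing never raises; `.getD 0` is the always-taken `some` branch)
def determine_shuffle_block_order (pid : Int) : List Int :=
  let block_positions : PySem.Dict String (List Int) := PySem.Dict.ofList
    [ ("a", [ 0,0,0,0,0,0,  1,1,1,1,1,1,  2,2,2,2,2,2, 3,3,2,3,3,3 ]),
      ("b", [ 1,1,2,2,3,3,  0,0,2,2,3,3,  0,0,1,1,3,3, 0,0,1,1,2,2 ]),
      ("c", [ 2,3,1,3,1,2,  2,3,0,3,0,2,  1,3,0,3,0,1, 1,2,0,2,0,1 ]),
      ("d", [ 3,2,3,1,2,1,  3,2,3,0,2,0,  3,1,3,0,1,0, 2,1,2,0,1,0 ]) ]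
  let order : Int := PySem.Int.mod ((PySem.Int.band pid 0x3E000) >>> 13) 24
  (PySem.Dict.values block_positions).map (fun block => (PySem.List.pyGet? block order).getD 0)

-- ===== PORT B =====
-- one iteration of Source B's loop body, state (digits, order, result), factor f;
-- `i` is always a valid index of `digits`, so pop? always returns some (the none branch is never taken)
def pvLehmerStep (st : List Int × Int × List Int) (f : Int) : List Int × Int × List Int :=
  let digits := st.1
  let ord := st.2.1
  let result := st.2.2
  let i := PySem.Int.floordiv ord f
  let ord' := PySem.Int.mod ord f
  match PySem.List.pop? digits i with
  | some (x, rest) => (rest, ord', result ++ [x])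
  | none => (digits, ord', result)

def determine_shuffle_block_order_alt (pid : Int) : List Int :=
  let order : Int := PySem.Int.mod ((PySem.Int.band pid 0x3E000) >>> 13) 24
  let st := ([6, 2, 1, 1] : List Int).foldl pvLehmerStep ([0, 1, 2, 3], order, [])
  st.2.2

-- ===== PRECONDITION & SPEC =====
-- On pids whose five shuffle-order bits (bits 13–17) hold the value 20, A returns
-- [2,1,0,2] — not a permutation, a typo in its 'a' table — while B returns the intended
-- 20th lexicographic permutation [3,1,0,2].
def D_determine_shuffle_block_order (pid : Int) : Prop :=
  PySem.Int.band pid 253952 = 163840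
instance (pid : Int) : Decidable (D_determine_shuffle_block_order pid) := by
  unfold D_determine_shuffle_block_order; infer_instance

def Spec_determine_shuffle_block_order (pid : Int) (out : List Int) : Prop :=
  ¬ D_determine_shuffle_block_order pid → out = determine_shuffle_block_order_alt pid
instance (pid : Int) (out : List Int) : Decidable (Spec_determine_shuffle_block_order pid out) := by
  unfold Spec_determine_shuffle_block_order; infer_instance

def pvDiffWitness_determine_shuffle_block_order : Int := 163840
def pvDiffWitnessOut_determine_shuffle_block_order : (List Int) × (List Int) :=
  ([2, 1, 0, 2], [3, 1, 0, 2])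

-- ===== CLAIM =====
def Claim_unchanged_determine_shuffle_block_order : Prop := ∀ (pid : Int), Dom_determine_shuffle_block_order pid → Spec_determine_shuffle_block_order pid (determine_shuffle_block_order pid)
def Claim_changed_determine_shuffle_block_order : Prop := Dom_determine_shuffle_block_order (pvDiffWitness_determine_shuffle_block_order) ∧ D_determine_shuffle_block_order (pvDiffWitness_determine_shuffle_block_order) ∧ determine_shuffle_block_order (pvDiffWitness_determine_shuffle_block_order) = pvDiffWitnessOut_determine_shuffle_block_order.1 ∧ determine_shuffle_block_order_alt (pvDiffWitness_determine_shuffle_block_order) = pvDiffWitnessOut_determine_shuffle_block_order.2 ∧ pvDiffWitnessOut_determine_shuffle_block_order.1 ≠ pvDiffWitnessOut_determine_shuffle_block_order.2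
def Claim_exact_determine_shuffle_block_order : Prop := ∀ (pid : Int), Dom_determine_shuffle_block_order pid → D_determine_shuffle_block_order pid → determine_shuffle_block_order pid ≠ determine_shuffle_block_order_alt pid

-- ===== LEMMAS AND PROOFS =====

-- both ports depend on pid only through the order value
def pvOrderOf (pid : Int) : Int := PySem.Int.mod ((PySem.Int.band pid 0x3E000) >>> 13) 24

def pvAfun (o : Int) : List Int :=
  (PySem.Dict.values (PySem.Dict.ofList
    [ ("a", ([ 0,0,0,0,0,0,  1,1,1,1,1,1,  2,2,2,2,2,2, 3,3,2,3,3,3 ] : List Int)),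
      ("b", [ 1,1,2,2,3,3,  0,0,2,2,3,3,  0,0,1,1,3,3, 0,0,1,1,2,2 ]),
      ("c", [ 2,3,1,3,1,2,  2,3,0,3,0,2,  1,3,0,3,0,1, 1,2,0,2,0,1 ]),
      ("d", [ 3,2,3,1,2,1,  3,2,3,0,2,0,  3,1,3,0,1,0, 2,1,2,0,1,0 ]) ])).map
    (fun block => (PySem.List.pyGet? block o).getD 0)

def pvBfun (o : Int) : List Int :=
  let st := ([6, 2, 1, 1] : List Int).foldl pvLehmerStep ([0, 1, 2, 3], o, [])
  st.2.2

theorem pvA_eq (pid : Int) : determine_shuffle_block_order pid = pvAfun (pvOrderOf pid) := by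
  unfold determine_shuffle_block_order pvAfun pvOrderOf
  rfl

theorem pvB_eq (pid : Int) : determine_shuffle_block_order_alt pid = pvBfun (pvOrderOf pid) := by
  unfold determine_shuffle_block_order_alt pvBfun pvOrderOf
  rfl

-- pid & 0x3E000 keeps only bits 13–17: it is of the form k * 2^13 with k < 32
theorem pvMaskDvd (n : Nat) : 8192 ∣ (n &&& 253952) := by
  have h1 : (n &&& 253952) &&& (2^13 - 1) = (n &&& 253952) % 2^13 :=
    Nat.and_two_pow_sub_one_eq_mod _ 13
  have h2 : (n &&& 253952) &&& (2^13 - 1) = n &&& (253952 &&& (2^13 - 1)) := Nat.and_assoc ..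
  have h3 : (253952 &&& (2^13 - 1)) = 0 := by decide
  have h4 : (n &&& 253952) % 2^13 = 0 := by rw [← h1, h2, h3, Nat.and_zero]
  omega

theorem pvBandShape (pid : Int) : ∃ k : Nat, k < 32 ∧ PySem.Int.band pid 253952 = (k : Int) * 8192 := by
  unfold PySem.Int.band
  by_cases h : (0 : Int) ≤ pid
  · rw [if_pos h, if_pos (by norm_num : (0:Int) ≤ 253952)]
    have hd := pvMaskDvd pid.toNat
    have hle : pid.toNat &&& 253952 ≤ 253952 := Nat.and_le_right
    refine ⟨(pid.toNat &&& 253952) / 8192, by omega, ?_⟩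
    push_cast; omega
  · rw [if_neg h, if_pos (by norm_num : (0:Int) ≤ 253952)]
    have ht : ((253952 : Int).toNat) = 253952 := rfl
    rw [ht, Nat.and_comm]
    have hd := pvMaskDvd (-pid - 1).toNat
    have hle : (-pid - 1).toNat &&& 253952 ≤ 253952 := Nat.and_le_right
    refine ⟨(253952 - ((-pid - 1).toNat &&& 253952)) / 8192, by omega, ?_⟩
    push_cast
    omega

-- ===== VERDICT =====
set_option maxHeartbeats 4000000 in
theorem determine_shuffle_block_order_spec : Claim_unchanged_determine_shuffle_block_order := by
  intro pid _ hD
  obtain ⟨k, hk, hb⟩ := pvBandShape pid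
  have hk20 : k ≠ 20 := by
    intro e
    exact hD (by show PySem.Int.band pid 253952 = 163840; rw [hb, e]; norm_num)
  have ho : pvOrderOf pid = PySem.Int.mod (((k : Int) * 8192) >>> 13) 24 := by
    unfold pvOrderOf
    rw [show (0x3E000 : Int) = 253952 from rfl, hb]
  rw [pvA_eq, pvB_eq, ho]
  interval_cases k <;> first | (exact absurd rfl hk20) | decide

theorem determine_shuffle_block_order_changed : Claim_changed_determine_shuffle_block_order := by
  unfold Claim_changed_determine_shuffle_block_order; decide

theorem determine_shuffle_block_order_tight : Claim_exact_determine_shuffle_block_order := by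
  intro pid _ hD
  have ho : pvOrderOf pid = PySem.Int.mod ((163840 : Int) >>> 13) 24 := by
    unfold pvOrderOf
    rw [show (0x3E000 : Int) = 253952 from rfl, hD]
  rw [pvA_eq, pvB_eq, ho]
  decide
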